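-- pv_equiv track=rewrite | github.com/olesyastorchakprojects/rag_engineering_playground | Execution/ingest/hybrid/ingest.py | normalize_sparse_token
-- ===== SOURCE A (Python) =====
-- from typing import Any, Dict, Iterable, List, Optional, Sequence, Tuple
--
-- def normalize_sparse_token(token: str, lowercase: bool, min_token_length: int) -> Optional[str]:
--     candidate = token
--     if lowercase:
--         candidate = candidate.lower()
--     if candidate.startswith("##"):
--         candidate = candidate[2:]
--     candidate = candidate.strip()
--     while candidate and not candidate[0].isalnum():
--         candidate = candidate[1:]
--     while candidate and not candidate[-1].isalnum():
--         candidate = candidate[:-1]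
--     if len(candidate) < min_token_length:
--         return None
--     if not any(ch.isalnum() for ch in candidate):
--         return None
--     return candidate
-- ===== SOURCE B (Python) =====
-- from typing import Optional
--
--
-- def normalize_sparse_token(token: str, lowercase: bool, min_token_length: int) -> Optional[str]:
--     s = token.lower() if lowercase else token
--     idxs = [i for i, ch in enumerate(s) if ch.isalnum()]
--     if not idxs:
--         return None
--     core = s[idxs[0]:idxs[-1] + 1]
--     return core if len(core) >= min_token_length else None
-- ===== Notes on version B (the rewrite author's own statement) =====
-- stated objective: simpler
-- what changed: Replaces the '##' prefix removal, .strip() and the two character-popping while-loops by one pass collecting the alnum indices and a single slice from the first to the last alnum character (the prefix/strip steps only remove non-alnum characters, so they are subsumed), and merges the two final guards into one.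
import Mathlib
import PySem

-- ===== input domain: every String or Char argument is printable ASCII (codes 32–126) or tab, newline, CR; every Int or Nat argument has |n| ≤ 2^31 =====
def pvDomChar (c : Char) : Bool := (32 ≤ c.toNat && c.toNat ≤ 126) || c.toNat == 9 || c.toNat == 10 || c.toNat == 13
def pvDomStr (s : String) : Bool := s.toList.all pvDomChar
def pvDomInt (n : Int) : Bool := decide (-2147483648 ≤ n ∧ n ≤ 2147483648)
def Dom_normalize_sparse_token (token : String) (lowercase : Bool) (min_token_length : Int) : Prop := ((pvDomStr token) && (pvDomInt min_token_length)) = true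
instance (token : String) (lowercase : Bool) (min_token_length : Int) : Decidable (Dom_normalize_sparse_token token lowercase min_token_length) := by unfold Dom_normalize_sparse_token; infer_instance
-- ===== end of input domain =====

-- B replaces A's '##'-prefix removal, .strip() and the two character-popping while-loops
-- by one pass collecting the alnum indices and a single slice from the first to the last
-- alnum character, merging the two final guards into one (objective: simpler).

-- ===== PORT A =====
-- while candidate and not candidate[0].isalnum(): candidate = candidate[1:]
def pvTrimFront : List Char → List Char
  | [] => []
  | c :: rest => if PySem.Chars.isalnum c then c :: rest else pvTrimFront rest

-- while candidate and not candidate[-1].isalnum(): candidate = candidate[:-1]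
def pvTrimBack (cs : List Char) : List Char :=
  if h : cs = [] then []
  else if PySem.Chars.isalnum (cs.getLast h) then cs
  else pvTrimBack cs.dropLast
termination_by cs.length
decreasing_by
  have hpos : 0 < cs.length := List.length_pos_of_ne_nil h
  simp only [List.length_dropLast]
  omega

def normalize_sparse_token (token : String) (lowercase : Bool) (min_token_length : Int) : Option String :=
  let c1 := if lowercase then PySem.Chars.lower token.toList else token.toList
  let c2 := if PySem.Chars.startswith c1 ['#', '#'] then PySem.List.slice c1 (some 2) none else c1
  let c3 := PySem.Chars.strip c2
  let c5 := pvTrimBack (pvTrimFront c3)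
  if (c5.length : Int) < min_token_length then none
  else if !(c5.any PySem.Chars.isalnum) then none
  else some (String.mk c5)

-- ===== PORT B =====
def normalize_sparse_token_alt (token : String) (lowercase : Bool) (min_token_length : Int) : Option String :=
  let s := if lowercase then PySem.Chars.lower token.toList else token.toList
  match (PySem.List.enumerate s).filterMap
      (fun pr => if PySem.Chars.isalnum pr.2 then some pr.1 else none) with
  | [] => none
  | i :: rest =>
    let j := (i :: rest).getLast (by simp)
    let core := PySem.List.slice s (some i) (some (j + 1))
    if min_token_length ≤ (core.length : Int) then some (String.mk core) else none

-- ===== PRECONDITION & SPEC =====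
def Spec_normalize_sparse_token (token : String) (lowercase : Bool) (min_token_length : Int) (out : Option String) : Prop := out = normalize_sparse_token_alt token lowercase min_token_length
instance (token : String) (lowercase : Bool) (min_token_length : Int) (out : Option String) : Decidable (Spec_normalize_sparse_token token lowercase min_token_length out) := by unfold Spec_normalize_sparse_token; infer_instance

-- ===== CLAIM (what is proved, stated in full; the proofs are below) =====
def Claim_equal_normalize_sparse_token : Prop := ∀ (token : String) (lowercase : Bool) (min_token_length : Int), Dom_normalize_sparse_token token lowercase min_token_length → Spec_normalize_sparse_token token lowercase min_token_length (normalize_sparse_token token lowercase min_token_length)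

-- ===== LEMMAS AND PROOFS =====

-- "not alnum": the predicate both while-loops (and the strip/'##' steps, a fortiori) remove
def pvNA (c : Char) : Bool := !PySem.Chars.isalnum c

def pvTrim (x : List Char) : List Char := ((x.dropWhile pvNA).reverse.dropWhile pvNA).reverse

lemma pv_trimFront_eq (cs : List Char) : pvTrimFront cs = cs.dropWhile pvNA := by
  induction cs with
  | nil => rfl
  | cons c t ih =>
    by_cases h : PySem.Chars.isalnum c = true <;>
      simp [pvTrimFront, List.dropWhile_cons, pvNA, h, ih]

lemma pv_trimBack_eq (cs : List Char) : pvTrimBack cs = (cs.reverse.dropWhile pvNA).reverse := by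
  induction cs using List.reverseRecOn with
  | nil => simp [pvTrimBack]
  | append_singleton t c ih =>
    have hne : t ++ [c] ≠ [] := by simp
    rw [pvTrimBack, dif_neg hne]
    have hgl : (t ++ [c]).getLast hne = c := by
      have h1 : (t ++ [c]).getLast? = some c := List.getLast?_concat
      have h2 : (t ++ [c]).getLast? = some ((t ++ [c]).getLast hne) :=
        List.getLast?_eq_getLast hne
      rw [h1] at h2
      exact (Option.some.inj h2).symm
    rw [hgl]
    by_cases h : PySem.Chars.isalnum c = true
    · rw [if_pos h]
      simp [pvNA, h]
    · have h' : PySem.Chars.isalnum c = false := by simpa using h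
      rw [if_neg h, List.dropLast_concat, ih]
      simp [pvNA, h']

lemma pv_dropWhile_append_all (p : Char → Bool) (u v : List Char)
    (h : ∀ x ∈ u, p x = true) : (u ++ v).dropWhile p = v.dropWhile p := by
  rw [List.dropWhile_append]
  simp [List.dropWhile_eq_nil_iff.mpr h]

lemma pv_takeWhile_append_all (p : Char → Bool) (u w : List Char)
    (h : ∀ x ∈ u, p x = true) : (u ++ w).takeWhile p = u ++ w.takeWhile p := by
  induction u with
  | nil => simp
  | cons a u' ih =>
    have ha : p a = true := h a (by simp)
    simp [List.takeWhile_cons, ha, ih (fun x hx => h x (by simp [hx]))]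

lemma pv_takeWhile_append_exists (p : Char → Bool) (u w : List Char)
    (h : ∃ x ∈ u, p x = false) : (u ++ w).takeWhile p = u.takeWhile p := by
  induction u with
  | nil => simp at h
  | cons a u' ih =>
    cases hpa : p a with
    | false => simp [List.takeWhile_cons, hpa]
    | true =>
      obtain ⟨x, hx, hpx⟩ := h
      rcases List.mem_cons.mp hx with rfl | hx'
      · rw [hpa] at hpx; cases hpx
      · simp [List.takeWhile_cons, hpa, ih ⟨x, hx', hpx⟩]

lemma pv_rev_drop (l : List Char) (n : Nat) :
    (l.drop n).reverse = l.reverse.take (l.length - n) := by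
  induction l generalizing n with
  | nil => simp
  | cons c t ih =>
    cases n with
    | zero =>
      simp [List.take_of_length_le]
    | succ n =>
      simp only [List.drop_succ_cons, List.reverse_cons, List.length_cons]
      rw [ih]
      have he : t.length + 1 - (n + 1) = t.length - n := by omega
      rw [he, List.take_append_of_le_length (by simp)]

lemma pv_dropWhile_eq_drop (p : Char → Bool) (l : List Char) :
    l.dropWhile p = l.drop (l.takeWhile p).length := by
  calc l.dropWhile p
      = (l.takeWhile p ++ l.dropWhile p).drop (l.takeWhile p).length := (List.drop_left).symm
    _ = l.drop (l.takeWhile p).length := by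
        rw [List.takeWhile_append_dropWhile]

lemma pv_dropWhile_head (p : Char → Bool) :
    ∀ (s : List Char) (c : Char) (z : List Char), s.dropWhile p = c :: z → p c = false := by
  intro s
  induction s with
  | nil => intro c z h; simp at h
  | cons a t ih =>
    intro c z h
    rw [List.dropWhile_cons] at h
    cases hpa : p a with
    | true => rw [hpa] at h; simp at h; exact ih c z h
    | false =>
      rw [hpa] at h; simp at h
      rw [← h.1]; exact hpa

lemma pv_sp_na (c : Char) (h : PySem.Chars.isspace c = true) : pvNA c = true := by
  simp only [PySem.Chars.isspace, Bool.or_eq_true, Bool.and_eq_true, decide_eq_true_iff] at h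
  simp only [pvNA, PySem.Chars.isalnum, PySem.Chars.isalpha, PySem.Chars.isdigit,
    PySem.Chars.isupper, PySem.Chars.islower, Bool.not_eq_true', Bool.or_eq_false_iff,
    Bool.and_eq_false_iff, decide_eq_false_iff_not, Char.le_def, UInt32.le_iff_toNat_le]
  have h0 : ('0').val.toNat = 48 := rfl
  have h9 : ('9').val.toNat = 57 := rfl
  have hA : ('A').val.toNat = 65 := rfl
  have hZ : ('Z').val.toNat = 90 := rfl
  have ha : ('a').val.toNat = 97 := rfl
  have hz : ('z').val.toNat = 122 := rfl
  have hc : c.val.toNat = c.toNat := rfl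
  rw [h0, h9, hA, hZ, ha, hz, hc]
  omega

-- removing non-alnum junk from either end does not change the trim
lemma pv_trim_middle (u m v : List Char) (hu : ∀ x ∈ u, pvNA x = true)
    (hv : ∀ x ∈ v, pvNA x = true) : pvTrim (u ++ m ++ v) = pvTrim m := by
  unfold pvTrim
  rw [List.append_assoc, pv_dropWhile_append_all _ u _ hu]
  cases hm : m.dropWhile pvNA with
  | nil =>
    have hmv : (m ++ v).dropWhile pvNA = [] := by
      rw [pv_dropWhile_append_all _ m _ (List.dropWhile_eq_nil_iff.mp hm)]
      exact List.dropWhile_eq_nil_iff.mpr hv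
    simp [hmv]
  | cons c z =>
    rw [List.dropWhile_append, hm]
    simp only [List.isEmpty_cons, Bool.false_eq_true, if_false]
    rw [List.reverse_append,
      pv_dropWhile_append_all _ v.reverse _ (fun x hx => hv x (List.mem_reverse.mp hx))]

lemma pv_trim_strip (x : List Char) : pvTrim (PySem.Chars.strip x) = pvTrim x := by
  have hy : x.dropWhile PySem.Chars.isspace =
      PySem.Chars.strip x ++ ((x.dropWhile PySem.Chars.isspace).reverse.takeWhile PySem.Chars.isspace).reverse := by
    conv_lhs => rw [← List.reverse_reverse (x.dropWhile PySem.Chars.isspace),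
      ← List.takeWhile_append_dropWhile (p := PySem.Chars.isspace)
        (l := (x.dropWhile PySem.Chars.isspace).reverse)]
    rw [List.reverse_append]
    rfl
  have hx : x = x.takeWhile PySem.Chars.isspace ++ PySem.Chars.strip x ++
      ((x.dropWhile PySem.Chars.isspace).reverse.takeWhile PySem.Chars.isspace).reverse := by
    rw [List.append_assoc, ← hy, List.takeWhile_append_dropWhile]
  conv_rhs => rw [hx]
  rw [pv_trim_middle]
  · exact fun x hx => pv_sp_na x (List.mem_takeWhile_imp hx)
  · exact fun x hx => pv_sp_na x (List.mem_takeWhile_imp (List.mem_reverse.mp hx))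

lemma pv_trim_hash (x : List Char) (h : PySem.Chars.startswith x ['#', '#'] = true) :
    pvTrim (PySem.List.slice x (some 2) none) = pvTrim x := by
  obtain ⟨t, ht⟩ := (PySem.Chars.startswith_iff x ['#', '#']).mp h
  have hslice : PySem.List.slice x (some 2) none = x.drop 2 := by
    have h2 : (2 : Int).toNat = 2 := rfl
    rw [PySem.List.slice_from x (by norm_num), h2]
  rw [hslice, ← ht]
  have hd : (['#', '#'] ++ t).drop 2 = t := rfl
  rw [hd]
  have hhash : pvNA '#' = true := by rfl
  have := pv_trim_middle ['#', '#'] t []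
    (by intro x hx; simp only [List.mem_cons, List.not_mem_nil, or_false] at hx
        rcases hx with h1 | h1 <;> (subst h1; exact hhash)) (by simp)
  simpa using this

-- the trim equals a single take of the dropWhile
lemma pv_trim_eq_take (s : List Char) :
    pvTrim s = (s.dropWhile pvNA).take
      ((s.dropWhile pvNA).length - (((s.dropWhile pvNA).reverse).takeWhile pvNA).length) := by
  unfold pvTrim
  rw [pv_dropWhile_eq_drop pvNA (s.dropWhile pvNA).reverse, pv_rev_drop]
  simp

-- index-list facts for port B
lemma pv_idx_nil (k : Int) (s : List Char) :
    ((PySem.List.enumerate s k).filterMap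
      (fun pr => if PySem.Chars.isalnum pr.2 then some pr.1 else none) = []) ↔
      s.dropWhile pvNA = [] := by
  induction s generalizing k with
  | nil => simp [PySem.List.enumerate_nil]
  | cons c t ih =>
    rw [PySem.List.enumerate_cons]
    cases hc : PySem.Chars.isalnum c with
    | true => simp [List.filterMap_cons, hc, List.dropWhile_cons, pvNA]
    | false => simp [List.filterMap_cons, hc, List.dropWhile_cons, pvNA, ih]

lemma pv_idx_head (k : Int) (s : List Char) (h : s.dropWhile pvNA ≠ []) :
    ((PySem.List.enumerate s k).filterMap
      (fun pr => if PySem.Chars.isalnum pr.2 then some pr.1 else none)).head? =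
      some (k + ((s.takeWhile pvNA).length : Int)) := by
  induction s generalizing k with
  | nil => simp at h
  | cons c t ih =>
    rw [PySem.List.enumerate_cons]
    cases hc : PySem.Chars.isalnum c with
    | true => simp [List.filterMap_cons, hc, List.takeWhile_cons, pvNA]
    | false =>
      have hna : pvNA c = true := by simp [pvNA, hc]
      have ht : t.dropWhile pvNA ≠ [] := by
        rw [List.dropWhile_cons, hna] at h; simpa using h
      rw [List.filterMap_cons]
      simp only [hc, Bool.false_eq_true, if_false]
      rw [ih (k + 1) ht]
      simp only [List.takeWhile_cons, hna, if_true, List.length_cons]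
      congr 1
      push_cast [List.length_cons]
      omega

lemma pv_idx_last (k : Int) (s : List Char) (h : s.dropWhile pvNA ≠ []) :
    ((PySem.List.enumerate s k).filterMap
      (fun pr => if PySem.Chars.isalnum pr.2 then some pr.1 else none)).getLast? =
      some (k + (s.length : Int) - 1 - ((s.reverse.takeWhile pvNA).length : Int)) := by
  induction s generalizing k with
  | nil => simp at h
  | cons c t ih =>
    rw [PySem.List.enumerate_cons]
    by_cases ht : t.dropWhile pvNA = []
    · have hall : ∀ x ∈ t, pvNA x = true := List.dropWhile_eq_nil_iff.mp ht
      have hc : PySem.Chars.isalnum c = true := by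
        by_contra hcc
        have hcc' : PySem.Chars.isalnum c = false := by simpa using hcc
        have hna : pvNA c = true := by simp [pvNA, hcc']
        rw [List.dropWhile_cons, hna] at h
        simp [ht] at h
      have hidxt : (PySem.List.enumerate t (k + 1)).filterMap
          (fun pr => if PySem.Chars.isalnum pr.2 then some pr.1 else none) = [] :=
        (pv_idx_nil _ _).mpr ht
      rw [List.filterMap_cons]
      simp only [hc, if_true, hidxt]
      rw [List.reverse_cons,
        pv_takeWhile_append_all _ _ _ (fun x hx => hall x (List.mem_reverse.mp hx))]
      simp only [List.takeWhile_cons, pvNA, hc, Bool.not_true, Bool.false_eq_true, if_false,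
        List.append_nil, List.getLast?_singleton, List.length_reverse, List.length_cons]
      congr 1
      push_cast [List.length_cons]
      omega
    · have hex : ∃ x ∈ t.reverse, pvNA x = false := by
        have := mt List.dropWhile_eq_nil_iff.mpr ht
        push_neg at this
        obtain ⟨x, hx, hpx⟩ := this
        exact ⟨x, List.mem_reverse.mpr hx, by simpa using hpx⟩
      have hlast := ih (k + 1) ht
      have hrev : ((c :: t).reverse.takeWhile pvNA).length = (t.reverse.takeWhile pvNA).length := by
        rw [List.reverse_cons, pv_takeWhile_append_exists _ _ _ hex]
      cases hc : PySem.Chars.isalnum c with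
      | true =>
        have htne : (PySem.List.enumerate t (k + 1)).filterMap
            (fun pr => if PySem.Chars.isalnum pr.2 then some pr.1 else none) ≠ [] :=
          fun e => ht ((pv_idx_nil _ _).mp e)
        obtain ⟨y, ys, e⟩ := List.exists_cons_of_ne_nil htne
        rw [List.filterMap_cons]
        simp only [hc, if_true]
        rw [e, List.getLast?_cons_cons, ← e, hlast, hrev]
        congr 1
        push_cast [List.length_cons]
        omega
      | false =>
        rw [List.filterMap_cons]
        simp only [hc, Bool.false_eq_true, if_false]
        rw [hlast, hrev]
        congr 1
        push_cast [List.length_cons]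
        omega

-- the main equivalence, on plain arguments
lemma pv_main (token : String) (lowercase : Bool) (min_token_length : Int) :
    normalize_sparse_token token lowercase min_token_length =
      normalize_sparse_token_alt token lowercase min_token_length := by
  simp only [normalize_sparse_token, normalize_sparse_token_alt]
  set s := if lowercase then PySem.Chars.lower token.toList else token.toList with hs
  -- A's result list is pvTrim s
  have hc5 : pvTrimBack (pvTrimFront (PySem.Chars.strip
      (if PySem.Chars.startswith s ['#', '#'] then PySem.List.slice s (some 2) none else s))) =
      pvTrim s := by
    rw [pv_trimFront_eq, pv_trimBack_eq]
    show pvTrim _ = pvTrim s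
    by_cases hss : PySem.Chars.startswith s ['#', '#'] = true
    · rw [if_pos hss, pv_trim_strip, pv_trim_hash s hss]
    · rw [if_neg hss, pv_trim_strip]
  rw [hc5]
  by_cases hd : s.dropWhile pvNA = []
  · have hidx : (PySem.List.enumerate s).filterMap
        (fun pr => if PySem.Chars.isalnum pr.2 then some pr.1 else none) = [] :=
      (pv_idx_nil 0 s).mpr hd
    rw [hidx]
    have htrim : pvTrim s = [] := by simp [pvTrim, hd]
    rw [htrim]
    show (if (([] : List Char).length : Int) < min_token_length then none
        else if (!(([] : List Char).any PySem.Chars.isalnum)) = true then none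
        else some (String.mk ([] : List Char))) = none
    simp
  · -- nonempty case
    obtain ⟨c, z, hcz⟩ := List.exists_cons_of_ne_nil hd
    have hcna : pvNA c = false := pv_dropWhile_head pvNA s c z hcz
    have hcq : PySem.Chars.isalnum c = true := by simpa [pvNA] using hcna
    have hidxne : (PySem.List.enumerate s).filterMap
        (fun pr => if PySem.Chars.isalnum pr.2 then some pr.1 else none) ≠ [] :=
      fun e => hd ((pv_idx_nil 0 s).mp e)
    obtain ⟨i, rest, hidx⟩ := List.exists_cons_of_ne_nil hidxne
    -- names for the lengths involved
    obtain ⟨a, ha⟩ : ∃ n, n = (s.takeWhile pvNA).length := ⟨_, rfl⟩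
    obtain ⟨L, hL⟩ : ∃ n, n = (s.reverse.takeWhile pvNA).length := ⟨_, rfl⟩
    obtain ⟨d, hdd⟩ : ∃ l, l = s.dropWhile pvNA := ⟨_, rfl⟩
    obtain ⟨L', hL'⟩ : ∃ n, n = (d.reverse.takeWhile pvNA).length := ⟨_, rfl⟩
    have hczd : d = c :: z := by rw [hdd, hcz]
    -- structural facts
    have hlen : s.length = a + d.length := by
      rw [ha, hdd, ← List.length_append, List.takeWhile_append_dropWhile]
    have hdrop : d = s.drop a := by rw [hdd, ha, pv_dropWhile_eq_drop]
    have hsrev : s.reverse = d.reverse ++ (s.takeWhile pvNA).reverse := by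
      rw [hdd]
      conv_lhs => rw [← List.takeWhile_append_dropWhile (p := pvNA) (l := s)]
      rw [List.reverse_append]
    have hLL : L = L' := by
      rw [hL, hL', hsrev,
        pv_takeWhile_append_exists _ _ _ ⟨c, List.mem_reverse.mpr (by simp [hczd]), hcna⟩]
    have hL'lt : L' < d.length := by
      have hpre := List.takeWhile_prefix (p := pvNA) (l := d.reverse)
      have hle : L' ≤ d.length := by
        rw [hL']
        simpa using hpre.length_le
      rcases lt_or_eq_of_le hle with hlt | heq
      · exact hlt
      · exfalso
        have heq2 : d.reverse.takeWhile pvNA = d.reverse :=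
          hpre.eq_of_length (by rw [← hL', heq, List.length_reverse])
        have hmem : c ∈ d.reverse.takeWhile pvNA := by
          rw [heq2]
          exact List.mem_reverse.mpr (by simp [hczd])
        have hcon := List.mem_takeWhile_imp hmem
        rw [hcna] at hcon
        cases hcon
    -- the head and last of the index list
    have hhead := pv_idx_head 0 s hd
    rw [hidx] at hhead
    simp only [List.head?_cons, Option.some.injEq] at hhead
    have hi : i = (a : Int) := by rw [ha]; omega
    have hlastq := pv_idx_last 0 s hd
    rw [hidx] at hlastq
    have hgl : ∀ (pf : (i :: rest) ≠ []), (i :: rest).getLast pf =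
        (s.length : Int) - 1 - (L : Int) := by
      intro pf
      have h2 := List.getLast?_eq_getLast (l := i :: rest) pf
      rw [h2] at hlastq
      have h3 := Option.some.inj hlastq
      rw [h3, hL]
      omega
    have hj1 : ∀ (pf : (i :: rest) ≠ []), (i :: rest).getLast pf + 1 =
        ((s.length - L : Nat) : Int) := by
      intro pf
      rw [hgl pf, Nat.cast_sub (by omega : L ≤ s.length)]
      omega
    have hcore : ∀ (pf : (i :: rest) ≠ []),
        PySem.List.slice s (some i) (some ((i :: rest).getLast pf + 1)) = pvTrim s := by
      intro pf
      rw [hj1 pf, hi,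
        PySem.List.slice_toNat s (Int.natCast_nonneg _) (Int.natCast_nonneg _),
        Int.toNat_natCast, Int.toNat_natCast, ← hdrop]
      rw [pv_trim_eq_take, ← hdd, ← hL']
      congr 1
      omega
    rw [hidx]
    show (if ((pvTrim s).length : Int) < min_token_length then none
        else if (!((pvTrim s).any PySem.Chars.isalnum)) = true then none
        else some (String.mk (pvTrim s))) =
      (if min_token_length ≤
          ((PySem.List.slice s (some i) (some ((i :: rest).getLast (by simp) + 1))).length : Int)
        then some (String.mk (PySem.List.slice s (some i) (some ((i :: rest).getLast (by simp) + 1))))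
        else none)
    simp only [hcore]
    -- pvTrim s starts with the alnum character c
    have htake : pvTrim s = List.take (d.length - L') d := by
      rw [pv_trim_eq_take, ← hdd, ← hL']
    have hcons : ∃ w, pvTrim s = c :: w := by
      obtain ⟨M, hM⟩ : ∃ M, d.length - L' = M + 1 := ⟨d.length - L' - 1, by omega⟩
      rw [htake, hM, hczd]
      exact ⟨z.take M, by simp [List.take_succ_cons]⟩
    obtain ⟨w, hw⟩ := hcons
    have hany : (pvTrim s).any PySem.Chars.isalnum = true := by
      rw [hw]
      simp [hcq]
    by_cases hmin : ((pvTrim s).length : Int) < min_token_length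
    · rw [if_pos hmin, if_neg (by omega)]
    · rw [if_neg hmin, hany]
      simp only [Bool.not_true, Bool.false_eq_true, if_false]
      rw [if_pos (by omega)]

-- ===== VERDICT (by name: the statement is the Claim_ definition above) =====
theorem normalize_sparse_token_spec : Claim_equal_normalize_sparse_token := by
  intro token lowercase min_token_length _
  unfold Spec_normalize_sparse_token
  exact pv_main token lowercase min_token_length
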